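-- pv_equiv track=rewrite | github.com/AlonsoAlviraa/Poly | src/mega_audit.py | _infer_region_tag
-- ===== SOURCE A (Python) =====
-- def _infer_region_tag(text: str) -> str:
--     t = text.lower()
--     if any(x in t for x in ['premier league', 'england', 'efl', 'fa cup']):
--         return 'england'
--     if any(x in t for x in ['la liga', 'laliga', 'spain', 'copa del rey']):
--         return 'spain'
--     if any(x in t for x in ['serie a', 'italy', 'coppa italia']):
--         return 'italy'
--     if any(x in t for x in ['bundesliga', 'germany', 'dfb']):
--         return 'germany'
--     if any(x in t for x in ['ligue 1', 'ligue1', 'france']):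
--         return 'france'
--     if any(x in t for x in ['nba', 'wnba', 'mlb', 'nfl', 'nhl', 'usa']):
--         return 'usa'
--     return ''
-- ===== SOURCE B (Python) =====
-- _TAGS = ['england', 'spain', 'italy', 'germany', 'france', 'usa']
-- _KEYWORD_PRIORITY = {
--     'premier league': 0, 'england': 0, 'efl': 0, 'fa cup': 0,
--     'la liga': 1, 'laliga': 1, 'spain': 1, 'copa del rey': 1,
--     'serie a': 2, 'italy': 2, 'coppa italia': 2,
--     'bundesliga': 3, 'germany': 3, 'dfb': 3,
--     'ligue 1': 4, 'ligue1': 4, 'france': 4,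
--     'nba': 5, 'wnba': 5, 'mlb': 5, 'nfl': 5, 'nhl': 5, 'usa': 5,
-- }
--
-- def _infer_region_tag(text: str) -> str:
--     t = text.lower()
--     best = len(_TAGS)
--     for kw, pri in _KEYWORD_PRIORITY.items():
--         if kw in t:
--             best = min(best, pri)
--     return _TAGS[best] if best < len(_TAGS) else ''
-- ===== Notes on version B (the rewrite author's own statement) =====
-- stated objective: alternative
-- what changed: Replaces the six early-return if-branches with a flat keyword-to-priority map folded in one full pass that accumulates the minimum matching priority, then indexes into a tag list (no early return, no grouping).
import Mathlib
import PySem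

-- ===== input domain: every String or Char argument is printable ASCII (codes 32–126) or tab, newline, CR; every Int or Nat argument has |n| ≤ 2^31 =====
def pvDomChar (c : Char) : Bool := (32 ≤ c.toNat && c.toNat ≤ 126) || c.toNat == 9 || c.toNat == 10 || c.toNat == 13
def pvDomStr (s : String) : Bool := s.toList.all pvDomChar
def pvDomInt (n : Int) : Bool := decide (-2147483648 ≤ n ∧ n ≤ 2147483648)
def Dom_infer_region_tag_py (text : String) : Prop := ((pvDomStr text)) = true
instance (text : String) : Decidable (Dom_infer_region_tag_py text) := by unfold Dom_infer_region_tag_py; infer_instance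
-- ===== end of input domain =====

-- B replaces A's six early-return branches with a flat keyword->priority map folded in one
-- full pass accumulating the minimum matching priority, then indexing into a tag list (alternative; same cost).

-- ===== PORT A =====
def infer_region_tag_py (text : String) : String :=
  let t := PySem.Str.lower text
  if ["premier league", "england", "efl", "fa cup"].any (fun x => PySem.Str.isIn x t) then "england"
  else if ["la liga", "laliga", "spain", "copa del rey"].any (fun x => PySem.Str.isIn x t) then "spain"
  else if ["serie a", "italy", "coppa italia"].any (fun x => PySem.Str.isIn x t) then "italy"
  else if ["bundesliga", "germany", "dfb"].any (fun x => PySem.Str.isIn x t) then "germany"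
  else if ["ligue 1", "ligue1", "france"].any (fun x => PySem.Str.isIn x t) then "france"
  else if ["nba", "wnba", "mlb", "nfl", "nhl", "usa"].any (fun x => PySem.Str.isIn x t) then "usa"
  else ""

-- ===== PORT B =====
def pvTAGS : List String := ["england", "spain", "italy", "germany", "france", "usa"]

-- the Python dict _KEYWORD_PRIORITY as an insertion-ordered association list
def pvKEYWORD_PRIORITY : List (String × Nat) :=
  [("premier league", 0), ("england", 0), ("efl", 0), ("fa cup", 0),
   ("la liga", 1), ("laliga", 1), ("spain", 1), ("copa del rey", 1),
   ("serie a", 2), ("italy", 2), ("coppa italia", 2),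
   ("bundesliga", 3), ("germany", 3), ("dfb", 3),
   ("ligue 1", 4), ("ligue1", 4), ("france", 4),
   ("nba", 5), ("wnba", 5), ("mlb", 5), ("nfl", 5), ("nhl", 5), ("usa", 5)]

def infer_region_tag_py_alt (text : String) : String :=
  let t := PySem.Str.lower text
  let best := pvKEYWORD_PRIORITY.foldl
    (fun b p => if PySem.Str.isIn p.1 t then min b p.2 else b) pvTAGS.length
  -- _TAGS[best]: best < len guarantees the index is in range, so pyGet? is some; getD "" is unreachable
  if best < pvTAGS.length then (PySem.List.pyGet? pvTAGS (Int.ofNat best)).getD "" else ""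

-- ===== PRECONDITION & SPEC =====
def Spec_infer_region_tag_py (text : String) (out : String) : Prop := out = infer_region_tag_py_alt text
instance (text : String) (out : String) : Decidable (Spec_infer_region_tag_py text out) := by unfold Spec_infer_region_tag_py; infer_instance

-- ===== CLAIM (what is proved, stated in full; the proofs are below) =====
def Claim_equal_infer_region_tag_py : Prop := ∀ (text : String), Dom_infer_region_tag_py text → Spec_infer_region_tag_py text (infer_region_tag_py text)

-- ===== LEMMAS AND PROOFS =====

-- folding one group of keywords that all carry the same priority i lowers the accumulator to i iff some keyword matches
theorem pv_fold_group (t : String) (kws : List String) (i acc : Nat) :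
    (kws.map (fun k => (k, i))).foldl
      (fun b p => if PySem.Str.isIn p.1 t then min b p.2 else b) acc
    = if kws.any (fun k => PySem.Str.isIn k t) then min acc i else acc := by
  induction kws generalizing acc with
  | nil => rfl
  | cons k ks ih =>
      rw [List.map_cons, List.foldl_cons, List.any_cons]
      cases h : PySem.Str.isIn k t <;>
        cases h2 : (ks.any fun k => PySem.Str.isIn k t) <;>
        simp only [ih, h2, Bool.true_or, Bool.false_or, if_true, if_false, Bool.false_eq_true] <;> omega

-- ===== VERDICT (by name: the statement is the Claim_ definition above) =====
theorem infer_region_tag_py_spec : Claim_equal_infer_region_tag_py := by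
  intro text _
  unfold Spec_infer_region_tag_py infer_region_tag_py infer_region_tag_py_alt
  have hsplit : pvKEYWORD_PRIORITY =
      (["premier league", "england", "efl", "fa cup"].map (fun k => (k, 0)))
      ++ (["la liga", "laliga", "spain", "copa del rey"].map (fun k => (k, 1)))
      ++ (["serie a", "italy", "coppa italia"].map (fun k => (k, 2)))
      ++ (["bundesliga", "germany", "dfb"].map (fun k => (k, 3)))
      ++ (["ligue 1", "ligue1", "france"].map (fun k => (k, 4)))
      ++ (["nba", "wnba", "mlb", "nfl", "nhl", "usa"].map (fun k => (k, 5))) := rfl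
  rw [hsplit]
  simp only [List.foldl_append, pv_fold_group]
  set t := PySem.Str.lower text with ht
  generalize (["premier league", "england", "efl", "fa cup"].any (fun x => PySem.Str.isIn x t)) = g1
  generalize (["la liga", "laliga", "spain", "copa del rey"].any (fun x => PySem.Str.isIn x t)) = g2
  generalize (["serie a", "italy", "coppa italia"].any (fun x => PySem.Str.isIn x t)) = g3
  generalize (["bundesliga", "germany", "dfb"].any (fun x => PySem.Str.isIn x t)) = g4
  generalize (["ligue 1", "ligue1", "france"].any (fun x => PySem.Str.isIn x t)) = g5
  generalize (["nba", "wnba", "mlb", "nfl", "nhl", "usa"].any (fun x => PySem.Str.isIn x t)) = g6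
  revert g1 g2 g3 g4 g5 g6
  decide
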